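-- pv_equiv track=rewrite | github.com/DataTrainingFoundations/DataTrainingRepo | Week2/Examples/CodingChallenges/sum_of_unique_sublists.py | sum_of_unique_sublists
-- ===== SOURCE A (Python) =====
-- def sum_of_unique_sublists(arr):
--     n = len(arr)
--     seen = {}
--     total = 0
--     start = 0  # start of the current unique window
--
--     for end, val in enumerate(arr):
--         if val in seen and seen[val] >= start:
--             start = seen[val] + 1
--         seen[val] = end
--         # sum all elements in current window
--         total += sum(arr[start:end+1])
--
--     return total
--
-- arr = [1, 2, 1]
-- ===== SOURCE B (Python) =====
-- def sum_of_unique_sublists(arr):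
--     # Pass 1: left boundary of the unique-element window ending at each index.
--     last = {}
--     starts = []
--     s = 0
--     for e, v in enumerate(arr):
--         if v in last and last[v] >= s:
--             s = last[v] + 1
--         last[v] = e
--         starts.append(s)
--     # Pass 2: prefix sums of arr.
--     prefix = [0]
--     for v in arr:
--         prefix.append(prefix[-1] + v)
--     # Pass 3: each window sum is an O(1) prefix difference.
--     return sum(prefix[e + 1] - prefix[st] for e, st in enumerate(starts))
-- ===== Notes on version B (the rewrite author's own statement) =====
-- stated objective: faster
-- what changed: B replaces A's per-step re-summation of arr[start:end+1] by three staged passes: it first builds the array of window starts, then a prefix-sum array, and finally totals each window as a prefix difference in O(1).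
import Mathlib
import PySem

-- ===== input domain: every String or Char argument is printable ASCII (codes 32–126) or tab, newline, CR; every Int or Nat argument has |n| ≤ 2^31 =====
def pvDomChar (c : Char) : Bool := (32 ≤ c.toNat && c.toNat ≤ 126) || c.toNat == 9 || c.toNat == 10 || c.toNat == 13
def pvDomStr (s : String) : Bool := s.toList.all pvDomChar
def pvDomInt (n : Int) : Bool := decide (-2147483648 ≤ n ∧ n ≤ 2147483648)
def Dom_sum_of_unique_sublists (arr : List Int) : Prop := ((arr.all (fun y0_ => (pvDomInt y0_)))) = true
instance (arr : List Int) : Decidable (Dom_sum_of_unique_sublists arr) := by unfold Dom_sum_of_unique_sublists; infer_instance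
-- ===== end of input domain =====

-- B replaces A's per-step re-summation of the slice arr[start:end+1] with three staged passes
-- (window-start array, prefix sums, prefix differences); objective: faster.

-- ===== PORT A =====
-- one iteration of A's loop; state = (seen, total, start), p = (end, val)
def pvStepA (arr : List Int) (st : PySem.Dict Int Int × Int × Int) (p : Int × Int) :
    PySem.Dict Int Int × Int × Int :=
  let seen := st.1
  let total := st.2.1
  let start := st.2.2
  let start :=
    match seen.get? p.2 with          -- 'val in seen' + 'seen[val]'
    | some j => if j ≥ start then j + 1 else start
    | none => start
  (seen.insert p.2 p.1,
   total + (PySem.List.slice arr (some start) (some (p.1 + 1))).sum,   -- total += sum(arr[start:end+1])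
   start)

def sum_of_unique_sublists (arr : List Int) : Int :=
  ((PySem.List.enumerate arr 0).foldl (pvStepA arr) (PySem.Dict.empty, 0, 0)).2.1

-- ===== PORT B =====
-- pass 1: one iteration; state = (last, s, starts), p = (e, v); 'starts.append(s)'
def pvPass1Step (st : PySem.Dict Int Int × Int × List Int) (p : Int × Int) :
    PySem.Dict Int Int × Int × List Int :=
  let last := st.1
  let s :=
    match last.get? p.2 with
    | some j => if j ≥ st.2.1 then j + 1 else st.2.1
    | none => st.2.1
  (last.insert p.2 p.1, s, st.2.2 ++ [s])

def pvStarts (arr : List Int) : List Int :=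
  ((PySem.List.enumerate arr 0).foldl pvPass1Step (PySem.Dict.empty, 0, [])).2.2

-- pass 2: 'prefix.append(prefix[-1] + v)'; prefix is never empty, so pyGetD … (-1) 0 is exact
def pvPrefix (arr : List Int) : List Int :=
  arr.foldl (fun acc v => acc ++ [PySem.List.pyGetD acc (-1) 0 + v]) [0]

-- pass 3: sum(prefix[e+1] - prefix[st] for e, st in enumerate(starts)); both indices are
-- always in range (0 ≤ st ≤ e < len(arr)), so pyGetD with default 0 is exact
def sum_of_unique_sublists_alt (arr : List Int) : Int :=
  let starts := pvStarts arr
  let pref := pvPrefix arr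
  (PySem.List.enumerate starts 0).foldl
    (fun t p => t + (PySem.List.pyGetD pref (p.1 + 1) 0 - PySem.List.pyGetD pref p.2 0)) 0

-- ===== PRECONDITION & SPEC =====
def Spec_sum_of_unique_sublists (arr : List Int) (out : Int) : Prop := out = sum_of_unique_sublists_alt arr
instance (arr : List Int) (out : Int) : Decidable (Spec_sum_of_unique_sublists arr out) := by unfold Spec_sum_of_unique_sublists; infer_instance

-- ===== CLAIM (what is proved, stated in full; the proofs are below) =====
def Claim_equal_sum_of_unique_sublists : Prop := ∀ (arr : List Int), Dom_sum_of_unique_sublists arr → Spec_sum_of_unique_sublists arr (sum_of_unique_sublists arr)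

-- ===== LEMMAS AND PROOFS =====

-- total of the window sums: window e (counting from k) spans arr[starts[e] : e+1]
def pvWT (arr : List Int) : Nat → List Int → Int
  | _, [] => 0
  | k, st :: rest => (PySem.List.slice arr (some st) (some ((k : Int) + 1))).sum + pvWT arr (k + 1) rest

-- partial-sum scan: pvPsc c xs = [c+xs[0], c+xs[0]+xs[1], …]
def pvPsc (c : Int) : List Int → List Int
  | [] => []
  | v :: t => (c + v) :: pvPsc (c + v) t

lemma pv_pass1_acc (xs : List Int) : ∀ (k : Int) (seen : PySem.Dict Int Int) (s : Int) (acc : List Int),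
    (PySem.List.enumerate xs k).foldl pvPass1Step (seen, s, acc)
      = ((((PySem.List.enumerate xs k).foldl pvPass1Step (seen, s, [])).1),
         (((PySem.List.enumerate xs k).foldl pvPass1Step (seen, s, [])).2.1),
         acc ++ (((PySem.List.enumerate xs k).foldl pvPass1Step (seen, s, [])).2.2)) := by
  induction xs with
  | nil => intro k seen s acc; simp [PySem.List.enumerate]
  | cons v rest ih =>
    intro k seen s acc
    rw [PySem.List.enumerate_cons, List.foldl_cons, List.foldl_cons]
    simp only [pvPass1Step]
    rw [ih (k + 1) _ _ (acc ++ [_]), ih (k + 1) _ _ ([] ++ [_])]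
    simp

lemma pv_prefix_fold : ∀ (xs acc : List Int) (x : Int), (PySem.List.pyGet? acc (-1)) = some x →
    xs.foldl (fun acc v => acc ++ [PySem.List.pyGetD acc (-1) 0 + v]) acc = acc ++ pvPsc x xs := by
  intro xs
  induction xs with
  | nil => intro acc x _; simp [pvPsc]
  | cons v t ih =>
    intro acc x hx
    rw [List.foldl_cons]
    have hget : PySem.List.pyGetD acc (-1) 0 = x := by
      simp [PySem.List.pyGetD, hx]
    rw [hget, ih (acc ++ [x + v]) (x + v) (PySem.List.pyGet?_neg_one_append_singleton acc (x + v)),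
        List.append_assoc]
    rfl

lemma pv_prefix_eq (arr : List Int) : pvPrefix arr = [0] ++ pvPsc 0 arr := by
  unfold pvPrefix
  exact pv_prefix_fold arr [0] 0 (by decide)

lemma pv_psc_getD : ∀ (xs : List Int) (c : Int) (i : Nat), i < xs.length →
    (pvPsc c xs).getD i 0 = c + (xs.take (i + 1)).sum := by
  intro xs
  induction xs with
  | nil => intro c i h; simp at h
  | cons v t ih =>
    intro c i h
    cases i with
    | zero => simp [pvPsc]
    | succ j =>
      have := ih (c + v) j (by simpa using h)
      simp only [pvPsc, List.getD_cons_succ, List.take_succ_cons, List.sum_cons, this]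
      ring

lemma pv_prefix_getD (arr : List Int) (i : Nat) (h : i ≤ arr.length) :
    PySem.List.pyGetD (pvPrefix arr) ((i : Nat) : Int) 0 = (arr.take i).sum := by
  rw [pv_prefix_eq, PySem.List.pyGetD_natCast]
  cases i with
  | zero => simp
  | succ j =>
    have hlen : j < arr.length := by omega
    simpa using pv_psc_getD arr 0 j hlen

lemma pv_slice_sum (arr : List Int) (a b : Nat) (hab : a ≤ b) :
    (PySem.List.slice arr (some ((a : Nat) : Int)) (some ((b : Nat) : Int))).sum
      = (arr.take b).sum - (arr.take a).sum := by
  rw [PySem.List.slice_natCast]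
  have h1 : b = a + (b - a) := by omega
  have h3 : a + (b - a) - a = b - a := by omega
  have h2 : (arr.take b).sum = (arr.take a).sum + ((arr.drop a).take (b - a)).sum := by
    rw [h1, List.take_add, List.sum_append, h3]
  omega

-- joint invariant for A's loop and B's pass 1: same start updates, A's total =
-- running total + window-sum total of the starts pass 1 will emit; pass-1 output
-- has one entry per element, each a Nat ≤ its window's end index
lemma pv_main (arr : List Int) : ∀ (xs : List Int) (k s : Nat) (seen : PySem.Dict Int Int) (total : Int),
    (∀ v j, seen.get? v = some j → 0 ≤ j ∧ j < (k : Int)) → s ≤ k →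
    (((PySem.List.enumerate xs (k : Int)).foldl (pvStepA arr) (seen, total, ((s : Nat) : Int))).2.1
        = total + pvWT arr k (((PySem.List.enumerate xs (k : Int)).foldl pvPass1Step (seen, ((s : Nat) : Int), [])).2.2))
    ∧ (((PySem.List.enumerate xs (k : Int)).foldl pvPass1Step (seen, ((s : Nat) : Int), [])).2.2).length = xs.length
    ∧ (∀ e, e < (((PySem.List.enumerate xs (k : Int)).foldl pvPass1Step (seen, ((s : Nat) : Int), [])).2.2).length →
        ∃ se : Nat, (((PySem.List.enumerate xs (k : Int)).foldl pvPass1Step (seen, ((s : Nat) : Int), [])).2.2).getD e 0 = ((se : Nat) : Int) ∧ se ≤ k + e) := by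
  intro xs
  induction xs with
  | nil =>
    intro k s seen total _ _
    refine ⟨by simp [PySem.List.enumerate, pvWT], by simp [PySem.List.enumerate], ?_⟩
    intro e he
    simp [PySem.List.enumerate] at he
  | cons v rest ih =>
    intro k s seen total hseen hsk
    -- the new start, as a Nat s' with s ≤ s' ≤ k
    obtain ⟨s', hss', hs'k, hstart⟩ :
        ∃ s' : Nat, s ≤ s' ∧ s' ≤ k ∧
          (match seen.get? v with
            | some j => if j ≥ ((s : Nat) : Int) then j + 1 else ((s : Nat) : Int)
            | none => ((s : Nat) : Int)) = ((s' : Nat) : Int) := by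
      cases hget : seen.get? v with
      | none => exact ⟨s, le_refl s, hsk, by simp⟩
      | some j =>
        obtain ⟨hj0, hjk⟩ := hseen v j hget
        by_cases hge : j ≥ ((s : Nat) : Int)
        · exact ⟨j.toNat + 1, by omega, by omega, by simp [hge]; omega⟩
        · exact ⟨s, le_refl s, hsk, by simp [hge]⟩
    have hseen' : ∀ v' j', (seen.insert v ((k : Nat) : Int)).get? v' = some j' →
        0 ≤ j' ∧ j' < (((k + 1 : Nat) : Nat) : Int) := by
      intro v' j' hget'
      by_cases hvv : v' = v
      · subst hvv
        rw [PySem.Dict.get?_insert_self] at hget'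
        cases hget'
        constructor <;> [positivity; (push_cast; omega)]
      · rw [PySem.Dict.get?_insert_of_ne seen ((k : Nat) : Int) hvv] at hget'
        obtain ⟨h1, h2⟩ := hseen v' j' hget'
        exact ⟨h1, by push_cast; omega⟩
    have hcast : (k : Int) + 1 = ((k + 1 : Nat) : Int) := by push_cast; ring
    obtain ⟨ihT, ihL, ihB⟩ := ih (k + 1) s' (seen.insert v ((k : Nat) : Int))
      (total + (PySem.List.slice arr (some ((s' : Nat) : Int)) (some (((k + 1 : Nat)) : Int))).sum)
      hseen' (by omega)
    rw [PySem.List.enumerate_cons, List.foldl_cons, List.foldl_cons]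
    simp only [pvStepA, pvPass1Step, hstart]
    rw [pv_pass1_acc rest ((k : Int) + 1) _ _ ([] ++ [((s' : Nat) : Int)])]
    rw [hcast]
    refine ⟨?_, by simpa using ihL, ?_⟩
    · rw [ihT]
      have : pvWT arr k (((s' : Nat) : Int) ::
          ((PySem.List.enumerate rest (((k + 1 : Nat) : Int))).foldl pvPass1Step
            (seen.insert v ((k : Nat) : Int), ((s' : Nat) : Int), [])).2.2)
          = (PySem.List.slice arr (some ((s' : Nat) : Int)) (some (((k + 1 : Nat)) : Int))).sum
            + pvWT arr (k + 1) (((PySem.List.enumerate rest (((k + 1 : Nat) : Int))).foldl pvPass1Step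
            (seen.insert v ((k : Nat) : Int), ((s' : Nat) : Int), [])).2.2) := by
        simp only [pvWT]
        rw [hcast]
      simp only [List.nil_append, List.singleton_append]
      rw [this]
      ring
    · intro e he
      simp only [List.nil_append] at he ⊢
      cases e with
      | zero => exact ⟨s', by simp, by omega⟩
      | succ j =>
        have hj : j < (((PySem.List.enumerate rest (((k + 1 : Nat) : Int))).foldl pvPass1Step
            (seen.insert v ((k : Nat) : Int), ((s' : Nat) : Int), [])).2.2).length := by
          simpa using he
        obtain ⟨se, h1, h2⟩ := ihB j hj
        exact ⟨se, by simpa using h1, by omega⟩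

-- pass 3 totals the same windows: fold of prefix differences = pvWT
lemma pv_p3 (arr : List Int) : ∀ (starts : List Int) (k : Nat) (t : Int),
    (∀ e, e < starts.length → ∃ se : Nat, starts.getD e 0 = ((se : Nat) : Int) ∧ se ≤ k + e) →
    k + starts.length ≤ arr.length →
    (PySem.List.enumerate starts (k : Int)).foldl
      (fun t p => t + (PySem.List.pyGetD (pvPrefix arr) (p.1 + 1) 0
                        - PySem.List.pyGetD (pvPrefix arr) p.2 0)) t
      = t + pvWT arr k starts := by
  intro starts
  induction starts with
  | nil => intro k t _ _; simp [PySem.List.enumerate, pvWT]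
  | cons st rest ih =>
    intro k t hb hlen
    obtain ⟨se, hse, hsek⟩ := hb 0 (by simp)
    simp only [List.getD_cons_zero] at hse
    have hsek' : se ≤ k := by omega
    rw [PySem.List.enumerate_cons, List.foldl_cons]
    have hcast : (k : Int) + 1 = ((k + 1 : Nat) : Int) := by push_cast; ring
    have hterm : t + (PySem.List.pyGetD (pvPrefix arr) ((k : Int) + 1) 0
        - PySem.List.pyGetD (pvPrefix arr) st 0)
        = t + (PySem.List.slice arr (some st) (some ((k : Int) + 1))).sum := by
      rw [hse, hcast, pv_prefix_getD arr (k + 1) (by simp at hlen; omega),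
          pv_prefix_getD arr se (by simp at hlen; omega), ← hcast]
      have := pv_slice_sum arr se (k + 1) (by omega)
      rw [hcast, this]
    rw [hterm, hcast, ih (k + 1) _ ?_ (by simp at hlen ⊢; omega)]
    · simp only [pvWT, ← hcast]; ring
    · intro e he
      obtain ⟨se', h1, h2⟩ := hb (e + 1) (by simpa using Nat.succ_lt_succ he)
      exact ⟨se', by simpa using h1, by omega⟩

-- ===== VERDICT (by name: the statement is the Claim_ definition above) =====
theorem sum_of_unique_sublists_spec : Claim_equal_sum_of_unique_sublists := by
  intro arr _
  unfold Spec_sum_of_unique_sublists sum_of_unique_sublists sum_of_unique_sublists_alt pvStarts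
  obtain ⟨hT, hL, hB⟩ := pv_main arr arr 0 0 PySem.Dict.empty 0
    (by intro v j h; simp [PySem.Dict.get?, PySem.Dict.empty] at h) (le_refl 0)
  simp only [Nat.cast_zero] at hT hL hB
  have h3 := pv_p3 arr
    ((((PySem.List.enumerate arr 0).foldl pvPass1Step (PySem.Dict.empty, 0, [])).2.2)) 0 0
    (by intro e he; simpa using hB e (by simpa using he)) (by omega)
  simp only [Nat.cast_zero] at h3
  rw [hT, h3]
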